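-- pv_equiv track=rewrite | github.com/nastyh/LeetCode | Search/3152_special_array_ii.py | isArraySpecial_binary_search
-- ===== SOURCE A (Python) =====
-- from typing import List
--
-- def isArraySpecial_binary_search(nums: List[int], queries: List[List[int]]) -> List[bool]:
--     """
--     O(M + NlogM) where M is the size of nums and N the size of queries
--     O(M)
--     perform an initial traversal of nums, identify the indices of elements that break
--     or violate the special array property. Find the indices of elements nums[i]
--     that have the same parity (even or odd) as its previous element:
--     if nums[i] % 2 == nums[i-1] % 2 is true, then nums[i] is a violating element.
--     After finding these violating indices, we know that any subarray containing
--     any of these indices is not a special array. Conversely, if a subarray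
--     contains no violating indices, then it is a special array.
--     perform binary search on the violating indices to see if any violating indices
--     fall between the range [start + 1, end]. Note that we start our search at start + 1
--     instead of start because the violating indices are defined relative to the element to their left.
--     Therefore, the first element of our subarray (at index start) is never a violating element,
--     and our search should begin at start + 1.
--     """
--     def _helper(st, end, violating_list):
--         l, r = 0, len(violating_list) - 1
--         while l <= r:
--             m = l + (r -l) // 2
--             violating_ix = violating_list[m]
--             if violating_ix < st:
--                 l = m + 1
--             elif violating_ix > end:
--                 r = m - 1
--             else:
--                 return True
--         return False
--
--     res, violating_indices = [False] * len(queries), []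
--     for i in range(1, len(nums)):
--         if nums[i] % 2 == nums[i - 1] % 2:
--             violating_indices.append(i)
--     for i in range(len(queries)):
--         query = queries[i]
--         start = query[0]
--         end = query[1]
--
--         found_violating_index = _helper(
--             start + 1, end, violating_indices
--         )
--
--         if found_violating_index:
--             res[i] = False
--         else:
--             res[i] = True
--
--     return res
-- ===== SOURCE B (Python) =====
-- from typing import List
--
-- def isArraySpecial_binary_search(nums: List[int], queries: List[List[int]]) -> List[bool]:
--     """Prefix count of parity violations; each query is answered by one subtraction."""
--     M = len(nums)
--     cnt = [0]
--     for i in range(1, M):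
--         cnt.append(cnt[-1] + (nums[i] % 2 == nums[i - 1] % 2))
--     res = []
--     for q in queries:
--         lo = max(q[0] + 1, 1)
--         hi = min(q[1], M - 1)
--         res.append(hi < lo or cnt[hi] == cnt[lo - 1])
--     return res
-- ===== Notes on version B (the rewrite author's own statement) =====
-- stated objective: alternative
-- what changed: Replaces the per-query binary search over the list of violating indices with a prefix-count array of parity violations, answering each query by one subtraction/comparison.
import Mathlib
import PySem

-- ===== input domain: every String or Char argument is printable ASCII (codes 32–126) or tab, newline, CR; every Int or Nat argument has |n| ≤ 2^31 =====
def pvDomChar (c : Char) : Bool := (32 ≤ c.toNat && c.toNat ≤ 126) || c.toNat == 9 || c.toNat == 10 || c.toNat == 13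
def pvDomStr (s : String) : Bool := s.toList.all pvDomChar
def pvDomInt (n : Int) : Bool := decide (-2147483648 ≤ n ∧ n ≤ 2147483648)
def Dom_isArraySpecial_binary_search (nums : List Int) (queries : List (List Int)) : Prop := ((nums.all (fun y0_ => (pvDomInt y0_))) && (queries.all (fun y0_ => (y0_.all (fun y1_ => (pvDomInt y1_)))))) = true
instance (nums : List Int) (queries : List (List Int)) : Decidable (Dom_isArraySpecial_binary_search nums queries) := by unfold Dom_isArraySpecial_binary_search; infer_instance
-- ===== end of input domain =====

-- B replaces A's per-query binary search over the violating-index list with a prefix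
-- count of parity violations, answering each query by one subtraction/comparison.


-- ===== PORT A =====
-- violating_indices: indices i in range(1, len(nums)) with nums[i] % 2 == nums[i-1] % 2
def pvBuildViol (nums : List Int) : List Int :=
  (PySem.List.pyRange 1 (PySem.List.len nums) 1).foldl
    (fun acc i =>
      if PySem.Int.mod (PySem.List.pyGetD nums i 0) 2
           = PySem.Int.mod (PySem.List.pyGetD nums (i - 1) 0) 2
      then acc ++ [i] else acc) []

-- _helper's while-loop: l, r move inward; terminates because r + 1 - l shrinks
def pvHelperGo (st en : Int) (vl : List Int) (l r : Int) : Bool :=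
  if h : l ≤ r then
    let m := l + PySem.Int.floordiv (r - l) 2
    let vix := PySem.List.pyGetD vl m 0
    if vix < st then pvHelperGo st en vl (m + 1) r
    else if vix > en then pvHelperGo st en vl l (m - 1)
    else true
  else false
termination_by (r + 1 - l).toNat
decreasing_by
  · have h2 : PySem.Int.floordiv (r - l) 2 = (r - l) / 2 :=
      PySem.Int.floordiv_eq_ediv_of_pos (by omega)
    simp only [h2]; omega
  · have h2 : PySem.Int.floordiv (r - l) 2 = (r - l) / 2 :=
      PySem.Int.floordiv_eq_ediv_of_pos (by omega)
    simp only [h2]; omega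

def pvHelper (st en : Int) (vl : List Int) : Bool :=
  pvHelperGo st en vl 0 (PySem.List.len vl - 1)

-- res[i] is assigned exactly once, in order of i; ported as building res left to right
def isArraySpecial_binary_search (nums : List Int) (queries : List (List Int)) : List Bool :=
  let violating := pvBuildViol nums
  queries.foldl
    (fun res query =>
      let start := PySem.List.pyGetD query 0 0
      let e := PySem.List.pyGetD query 1 0
      let found := pvHelper (start + 1) e violating
      res ++ [if found then false else true]) []

-- ===== PORT B =====
-- cnt[j] = number of parity violations at indices 1..j  (cnt[-1] is the running last entry)
def pvCnt (nums : List Int) : List Int :=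
  (PySem.List.pyRange 1 (PySem.List.len nums) 1).foldl
    (fun c i =>
      c ++ [PySem.List.pyGetD c (-1) 0 +
        (if PySem.Int.mod (PySem.List.pyGetD nums i 0) 2
              = PySem.Int.mod (PySem.List.pyGetD nums (i - 1) 0) 2
         then 1 else 0)]) [0]

def isArraySpecial_binary_search_alt (nums : List Int) (queries : List (List Int)) : List Bool :=
  let M := PySem.List.len nums
  let cnt := pvCnt nums
  queries.foldl
    (fun res q =>
      let lo := max (PySem.List.pyGetD q 0 0 + 1) 1
      let hi := min (PySem.List.pyGetD q 1 0) (M - 1)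
      res ++ [decide (hi < lo) ||
              decide (PySem.List.pyGetD cnt hi 0 = PySem.List.pyGetD cnt (lo - 1) 0)]) []

-- ===== PRECONDITION & SPEC =====
-- A raises IndexError on query[0]/query[1] when a query has fewer than two entries; exactly those are excluded.
def Pre_isArraySpecial_binary_search (nums : List Int) (queries : List (List Int)) : Prop :=
  ∀ q ∈ queries, 2 ≤ q.length
instance (nums : List Int) (queries : List (List Int)) : Decidable (Pre_isArraySpecial_binary_search nums queries) := by unfold Pre_isArraySpecial_binary_search; infer_instance

def pvWitness_isArraySpecial_binary_search : List Int × List (List Int) :=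
  ([1, 2, 4, 3], [[0, 2], [1, 3], [2, 2]])

def Spec_isArraySpecial_binary_search (nums : List Int) (queries : List (List Int)) (out : List Bool) : Prop := out = isArraySpecial_binary_search_alt nums queries
instance (nums : List Int) (queries : List (List Int)) (out : List Bool) : Decidable (Spec_isArraySpecial_binary_search nums queries out) := by unfold Spec_isArraySpecial_binary_search; infer_instance

-- ===== CLAIM (what is proved, stated in full; the proofs are below) =====
def Claim_equal_isArraySpecial_binary_search : Prop := ∀ (nums : List Int) (queries : List (List Int)), Dom_isArraySpecial_binary_search nums queries → Pre_isArraySpecial_binary_search nums queries → Spec_isArraySpecial_binary_search nums queries (isArraySpecial_binary_search nums queries)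

-- ===== LEMMAS AND PROOFS =====
-- parity-violation test at index i (the condition both programs' builds share)
def pvP (nums : List Int) (i : Int) : Bool :=
  decide (PySem.Int.mod (PySem.List.pyGetD nums i 0) 2
            = PySem.Int.mod (PySem.List.pyGetD nums (i - 1) 0) 2)
theorem pvBuildViol_eq (nums : List Int) :
    pvBuildViol nums
      = (PySem.List.pyRange 1 (PySem.List.len nums) 1).filter (pvP nums) := by
  unfold pvBuildViol
  rw [show (fun (acc : List Int) (i : Int) =>
        if PySem.Int.mod (PySem.List.pyGetD nums i 0) 2
             = PySem.Int.mod (PySem.List.pyGetD nums (i - 1) 0) 2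
        then acc ++ [i] else acc)
      = (fun (acc : List Int) (i : Int) => if (pvP nums) i = true then acc ++ [id i] else acc) from by
        funext acc i; simp [pvP]]
  rw [PySem.List.foldl_append_if (pvP nums) id]
  simp

theorem pvBuildViol_mem (nums : List Int) (i : Int) :
    i ∈ pvBuildViol nums ↔ 1 ≤ i ∧ i < (nums.length : Int) ∧ pvP nums i = true := by
  rw [pvBuildViol_eq]
  simp [List.mem_filter, PySem.List.mem_pyRange_one, PySem.List.len]
  tauto

theorem pvBuildViol_sorted (nums : List Int) :
    (pvBuildViol nums).Pairwise (· ≤ ·) := by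
  rw [pvBuildViol_eq]
  exact ((PySem.List.pairwise_lt_pyRange_one 1 (PySem.List.len nums)).filter _).imp (fun h => le_of_lt h)
theorem pvHelperGo_iff (st en : Int) (vl : List Int) (hs : vl.Pairwise (· ≤ ·))
    (l r : Int) (h0 : 0 ≤ l) (hr : r < (vl.length : Int))
    (hL : ∀ (j : Nat) (hj : j < vl.length), (j : Int) < l → vl[j] < st)
    (hR : ∀ (j : Nat) (hj : j < vl.length), r < (j : Int) → en < vl[j]) :
    (pvHelperGo st en vl l r = true ↔ ∃ x ∈ vl, st ≤ x ∧ x ≤ en) := by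
  rw [pvHelperGo]
  by_cases h : l ≤ r
  · simp only [dif_pos h]
    have hfd : PySem.Int.floordiv (r - l) 2 = (r - l) / 2 :=
      PySem.Int.floordiv_eq_ediv_of_pos (by omega)
    have hmb : l ≤ l + PySem.Int.floordiv (r - l) 2 ∧ l + PySem.Int.floordiv (r - l) 2 ≤ r := by
      rw [hfd]; omega
    set m := l + PySem.Int.floordiv (r - l) 2 with hm
    have hmlen : m.toNat < vl.length := by omega
    have hmc : (m.toNat : Int) = m := by omega
    have hget : PySem.List.pyGetD vl m 0 = vl[m.toNat] :=
      PySem.List.pyGetD_eq_getElem vl 0 (by omega) (by omega)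
    have hpw := List.pairwise_iff_getElem.mp hs
    by_cases h1 : PySem.List.pyGetD vl m 0 < st
    · rw [if_pos h1]
      refine pvHelperGo_iff st en vl hs (m + 1) r (by omega) hr ?_ hR
      intro j hj hjm
      rcases eq_or_lt_of_le (show (j : Int) ≤ m by omega) with he | hlt
      · have : j = m.toNat := by omega
        simp only [this]; rw [hget] at h1; exact h1
      · have hjm' : j < m.toNat := by omega
        have := hpw j m.toNat hj hmlen hjm'
        rw [hget] at h1; omega
    · rw [if_neg h1]
      by_cases h2 : en < PySem.List.pyGetD vl m 0
      · rw [if_pos h2]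
        refine pvHelperGo_iff st en vl hs l (m - 1) h0 (by omega) hL ?_
        intro j hj hjm
        rcases eq_or_lt_of_le (show m ≤ (j : Int) by omega) with he | hlt
        · have : j = m.toNat := by omega
          simp only [this]; rw [hget] at h2; exact h2
        · have hjm' : m.toNat < j := by omega
          have := hpw m.toNat j hmlen hj hjm'
          rw [hget] at h2; omega
      · rw [if_neg h2]
        simp only [true_iff]
        exact ⟨vl[m.toNat], List.getElem_mem hmlen, by rw [hget] at h1 h2; constructor <;> omega⟩
  · simp only [dif_neg h]
    constructor
    · intro hfalse; exact absurd hfalse (by simp)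
    · rintro ⟨x, hx, hst, hen⟩
      obtain ⟨j, hj, hxj⟩ := List.mem_iff_getElem.mp hx
      by_cases hjl : (j : Int) < l
      · have := hL j hj hjl; omega
      · have := hR j hj (by omega); omega
termination_by (r + 1 - l).toNat
decreasing_by
  · have h2 : PySem.Int.floordiv (r - l) 2 = (r - l) / 2 :=
      PySem.Int.floordiv_eq_ediv_of_pos (by omega)
    simp only [h2]; omega
  · have h2 : PySem.Int.floordiv (r - l) 2 = (r - l) / 2 :=
      PySem.Int.floordiv_eq_ediv_of_pos (by omega)
    simp only [h2]; omega
def pvN (nums : List Int) (j : Int) : Int :=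
  (((PySem.List.pyRange 1 (j + 1) 1).filter (pvP nums)).length : Int)
theorem pvHelper_iff (nums : List Int) (st en : Int) :
    (pvHelper st en (pvBuildViol nums) = true
      ↔ ∃ i, 1 ≤ i ∧ i < (nums.length : Int) ∧ pvP nums i = true ∧ st ≤ i ∧ i ≤ en) := by
  unfold pvHelper
  rw [pvHelperGo_iff st en (pvBuildViol nums) (pvBuildViol_sorted nums) 0
        ((PySem.List.len (pvBuildViol nums)) - 1) (le_refl 0)
        (by simp only [PySem.List.len_eq]; omega)
        (by intro j hj hjl; omega)
        (by intro j hj hjr; simp only [PySem.List.len_eq] at hjr; omega)]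
  constructor
  · rintro ⟨x, hx, h1, h2⟩
    obtain ⟨ha, hb, hc⟩ := (pvBuildViol_mem nums x).mp hx
    exact ⟨x, ha, hb, hc, h1, h2⟩
  · rintro ⟨i, ha, hb, hc, h1, h2⟩
    exact ⟨i, (pvBuildViol_mem nums i).mpr ⟨ha, hb, hc⟩, h1, h2⟩

theorem pvCnt_eq_map (nums : List Int) (b : Nat) :
    (PySem.List.pyRange 1 (1 + (b : Int)) 1).foldl
      (fun c i =>
        c ++ [PySem.List.pyGetD c (-1) 0 +
          (if PySem.Int.mod (PySem.List.pyGetD nums i 0) 2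
                = PySem.Int.mod (PySem.List.pyGetD nums (i - 1) 0) 2
           then 1 else 0)]) [0]
      = (List.range (b + 1)).map (fun (j : Nat) => pvN nums (j : Int)) := by
  induction b with
  | zero =>
      rw [PySem.List.pyRange_one_eq_nil (by omega)]
      simp [pvN, PySem.List.pyRange_one_eq_nil]
  | succ b ih =>
      have hsplit : PySem.List.pyRange 1 (1 + ((b + 1 : Nat) : Int)) 1
          = PySem.List.pyRange 1 (1 + (b : Int)) 1 ++ [1 + (b : Int)] := by
        have h : (1 : Int) + ((b + 1 : Nat) : Int) = (1 + (b : Int)) + 1 := by push_cast; ring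
        rw [h, PySem.List.pyRange_one_succ_right (by omega)]
      have hlast : (List.range (b + 1)).map (fun (j : Nat) => pvN nums (j : Int))
          = (List.range b).map (fun (j : Nat) => pvN nums (j : Int)) ++ [pvN nums (b : Int)] := by
        rw [List.range_succ, List.map_append]; rfl
      have hN : pvN nums ((b + 1 : Nat) : Int)
          = pvN nums (b : Int)
            + (if PySem.Int.mod (PySem.List.pyGetD nums (1 + (b : Int)) 0) 2
                    = PySem.Int.mod (PySem.List.pyGetD nums (1 + (b : Int) - 1) 0) 2
               then 1 else 0) := by
        have h3 : (1 : Int) + (b : Int) = (b : Int) + 1 := by ring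
        rw [h3]
        unfold pvN
        have h2 : ((b + 1 : Nat) : Int) + 1 = ((b : Int) + 1) + 1 := by push_cast; ring
        rw [h2, PySem.List.pyRange_one_succ_right (by omega), List.filter_append,
            List.length_append, List.filter_cons]
        simp only [pvP, decide_eq_true_eq]
        split <;> simp
      rw [hsplit, List.foldl_append, ih]
      simp only [List.foldl_cons, List.foldl_nil]
      conv_lhs => rw [hlast]
      rw [PySem.List.pyGetD_neg_one_append_singleton]
      rw [show List.range (b + 1 + 1) = List.range (b + 1) ++ [b + 1] from List.range_succ,
          List.map_append, hlast, List.append_assoc]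
      rw [List.map_singleton, hN]
      simp [List.append_assoc]
theorem pvCnt_getD (nums : List Int) (j : Int) (h0 : 0 ≤ j) (hj : j < (nums.length : Int)) :
    PySem.List.pyGetD (pvCnt nums) j 0 = pvN nums j := by
  unfold pvCnt
  obtain ⟨b, hb⟩ : ∃ b : Nat, nums.length = b + 1 := ⟨nums.length - 1, by omega⟩
  have hlen : PySem.List.len nums = 1 + (b : Int) := by
    rw [PySem.List.len_eq, hb]; push_cast; ring
  rw [hlen, pvCnt_eq_map]
  have hjn : j = ((j.toNat : Nat) : Int) := by omega
  rw [hjn, PySem.List.pyGetD_natCast, PySem.List.getD_map_range _ _ _ _ (by omega)]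

theorem pvN_split (nums : List Int) (lo hi : Int) (h1 : 1 ≤ lo) (hlh : lo ≤ hi) :
    pvN nums hi = pvN nums (lo - 1)
      + (((PySem.List.pyRange lo (hi + 1) 1).filter (pvP nums)).length : Int) := by
  unfold pvN
  rw [PySem.List.pyRange_one_append 1 lo (hi + 1) h1 (by omega), List.filter_append,
      List.length_append]
  have h2 : lo - 1 + 1 = lo := by ring
  rw [h2]
  push_cast; ring

theorem pvQuery_eq (nums : List Int) (q : List Int) :
    (if pvHelper (PySem.List.pyGetD q 0 0 + 1) (PySem.List.pyGetD q 1 0) (pvBuildViol nums)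
     then false else true)
      = (decide (min (PySem.List.pyGetD q 1 0) (PySem.List.len nums - 1)
                  < max (PySem.List.pyGetD q 0 0 + 1) 1) ||
         decide (PySem.List.pyGetD (pvCnt nums)
                    (min (PySem.List.pyGetD q 1 0) (PySem.List.len nums - 1)) 0
                  = PySem.List.pyGetD (pvCnt nums)
                    (max (PySem.List.pyGetD q 0 0 + 1) 1 - 1) 0)) := by
  rw [PySem.List.len_eq]
  set s := PySem.List.pyGetD q 0 0 with hs
  set e := PySem.List.pyGetD q 1 0 with he
  set lo := max (s + 1) 1 with hlo
  set hi := min e ((nums.length : Int) - 1) with hhi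
  have hA : (pvHelper (s + 1) e (pvBuildViol nums) = true)
      ↔ ∃ i, lo ≤ i ∧ i ≤ hi ∧ pvP nums i = true := by
    rw [pvHelper_iff]
    constructor
    · rintro ⟨i, h1, h2, h3, h4, h5⟩; exact ⟨i, by omega, by omega, h3⟩
    · rintro ⟨i, h1, h2, h3⟩
      refine ⟨i, by omega, by omega, h3, by omega, by omega⟩
  by_cases hcase : hi < lo
  · have hno : pvHelper (s + 1) e (pvBuildViol nums) = false := by
      rw [Bool.eq_false_iff, Ne, hA]
      rintro ⟨i, h1, h2, _⟩; omega
    rw [hno]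
    simp [hcase]
  · have hlohi : lo ≤ hi := by omega
    have h1lo : (1 : Int) ≤ lo := le_max_right _ _
    have hhiM : hi ≤ (nums.length : Int) - 1 := min_le_right _ _
    rw [pvCnt_getD nums hi (by omega) (by omega),
        pvCnt_getD nums (lo - 1) (by omega) (by omega)]
    have hEq : (pvN nums hi = pvN nums (lo - 1))
        ↔ ¬ ∃ i, lo ≤ i ∧ i ≤ hi ∧ pvP nums i = true := by
      rw [pvN_split nums lo hi h1lo hlohi]
      constructor
      · intro h ⟨i, ha, hb, hc⟩
        have hmem : i ∈ (PySem.List.pyRange lo (hi + 1) 1).filter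
            (pvP nums) := by
          rw [List.mem_filter, PySem.List.mem_pyRange_one]
          exact ⟨⟨ha, by omega⟩, hc⟩
        have hlen0 : ((PySem.List.pyRange lo (hi + 1) 1).filter
            (pvP nums)).length = 0 := by omega
        rw [List.length_eq_zero_iff] at hlen0
        rw [hlen0] at hmem
        exact absurd hmem (List.not_mem_nil)
      · intro hno
        have hnil : (PySem.List.pyRange lo (hi + 1) 1).filter
            (pvP nums) = [] := by
          rw [List.filter_eq_nil_iff]
          intro a ha
          rw [PySem.List.mem_pyRange_one] at ha
          intro hp
          exact hno ⟨a, ha.1, by omega, hp⟩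
        rw [hnil]
        simp
    by_cases hex : ∃ i, lo ≤ i ∧ i ≤ hi ∧ pvP nums i = true
    · rw [hA.mpr hex]
      have : ¬ (pvN nums hi = pvN nums (lo - 1)) := fun h => (hEq.mp h) hex
      simp [hcase, this]
    · have hno : pvHelper (s + 1) e (pvBuildViol nums) = false := by
        rw [Bool.eq_false_iff, Ne, hA]; exact hex
      rw [hno]
      have : pvN nums hi = pvN nums (lo - 1) := hEq.mpr hex
      simp [hcase, this]

-- ===== VERDICT (by name: the statement is the Claim_ definition above) =====
theorem isArraySpecial_binary_search_spec : Claim_equal_isArraySpecial_binary_search := by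
  intro nums queries _hdom _hpre
  unfold Spec_isArraySpecial_binary_search isArraySpecial_binary_search isArraySpecial_binary_search_alt
  rw [PySem.List.foldl_append_singleton_eq_map
        (fun query => if pvHelper (PySem.List.pyGetD query 0 0 + 1) (PySem.List.pyGetD query 1 0)
                           (pvBuildViol nums) then false else true) queries [],
      PySem.List.foldl_append_singleton_eq_map
        (fun q => decide (min (PySem.List.pyGetD q 1 0) (PySem.List.len nums - 1)
                  < max (PySem.List.pyGetD q 0 0 + 1) 1) ||
         decide (PySem.List.pyGetD (pvCnt nums)
                    (min (PySem.List.pyGetD q 1 0) (PySem.List.len nums - 1)) 0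
                  = PySem.List.pyGetD (pvCnt nums)
                    (max (PySem.List.pyGetD q 0 0 + 1) 1 - 1) 0)) queries []]
  simp only [List.nil_append]
  exact List.map_congr_left (fun q _hq => pvQuery_eq nums q)
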